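-- pv_equiv track=rewrite | github.com/stafidopsomo/IR-LabProject-2024-2025 | search_engine.py | filter_documents
-- ===== SOURCE A (Python) =====
-- def filter_documents(query, inverted_index, titles):
--     query_terms = query.split()
--
--     # Identify required and excluded terms
--     required_terms = [term for term in query_terms if term.upper() not in ["AND", "OR", "NOT"] and not term.upper().startswith("NOT")]
--     excluded_terms = [term[4:] for term in query_terms if term.upper().startswith("NOT")]
--
--     # Filter documents by required terms (AND logic)
--     candidate_indices = set(range(len(titles)))
--     for term in required_terms:
--         if term in inverted_index:
--             term_indices = {titles.index(doc) for doc in inverted_index[term]}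
--             candidate_indices &= term_indices  # Intersect for AND logic
--         else:
--             candidate_indices = set()  # If a term is missing, no documents match
--             break
--
--     # Exclude documents containing unwanted terms
--     excluded_indices = set()
--     for term in excluded_terms:
--         if term in inverted_index:
--             excluded_indices |= {titles.index(doc) for doc in inverted_index[term]}
--     candidate_indices -= excluded_indices
--
--     return candidate_indices
-- ===== SOURCE B (Python) =====
-- def filter_documents(query, inverted_index, titles):
--     query_terms = query.split()
--
--     required_terms = [term for term in query_terms if term.upper() not in ["AND", "OR", "NOT"] and not term.upper().startswith("NOT")]
--     excluded_terms = [term[4:] for term in query_terms if term.upper().startswith("NOT")]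
--
--     # Distinct required terms, bailing out as soon as one is missing from the index
--     distinct_required = []
--     for term in required_terms:
--         if term not in inverted_index:
--             return set()
--         if term not in distinct_required:
--             distinct_required.append(term)
--
--     # Tally: a document index is a candidate iff every distinct required term hit it
--     counts = {}
--     for term in distinct_required:
--         for i in {titles.index(doc) for doc in inverted_index[term]}:
--             counts[i] = counts.get(i, 0) + 1
--
--     excluded_indices = set()
--     for term in excluded_terms:
--         if term in inverted_index:
--             excluded_indices |= {titles.index(doc) for doc in inverted_index[term]}
--
--     need = len(distinct_required)
--     return {i for i in range(len(titles))
--             if counts.get(i, 0) == need and i not in excluded_indices}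
-- ===== Notes on version B (the rewrite author's own statement) =====
-- stated objective: alternative
-- what changed: Replaces A's repeated set intersections over required terms with a single tally-then-threshold pass: a count table over document indices is built from the distinct required terms (bailing out to set() at the first missing term) and candidates are the indices whose count equals the number of distinct required terms, defaulting to all indices when there are none.
import Mathlib
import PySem

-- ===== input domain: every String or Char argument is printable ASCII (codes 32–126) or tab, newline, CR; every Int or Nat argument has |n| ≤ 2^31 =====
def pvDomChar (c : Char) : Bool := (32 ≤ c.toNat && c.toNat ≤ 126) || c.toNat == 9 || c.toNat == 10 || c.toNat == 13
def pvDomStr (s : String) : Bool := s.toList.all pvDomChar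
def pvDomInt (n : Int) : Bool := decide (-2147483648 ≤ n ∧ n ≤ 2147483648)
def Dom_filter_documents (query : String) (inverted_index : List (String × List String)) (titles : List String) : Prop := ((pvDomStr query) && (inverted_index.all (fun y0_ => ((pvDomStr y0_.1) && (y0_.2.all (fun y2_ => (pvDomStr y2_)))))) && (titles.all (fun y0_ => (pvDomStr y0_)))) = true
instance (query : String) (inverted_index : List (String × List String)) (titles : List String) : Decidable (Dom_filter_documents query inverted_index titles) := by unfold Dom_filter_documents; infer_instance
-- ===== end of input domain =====

-- B replaces A's repeated set intersections with one tally-then-threshold pass over a count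
-- table keyed by document index (objective: alternative decomposition, same asymptotic cost).

-- ===== shared term/lookup helpers (identical lines in both Pythons) =====
-- term.upper() in ["AND","OR","NOT"]
def pvIsOp (t : String) : Bool :=
  PySem.Str.upper t == "AND" || PySem.Str.upper t == "OR" || PySem.Str.upper t == "NOT"
-- term.upper().startswith("NOT")
def pvStartsNot (t : String) : Bool := PySem.Str.startswith (PySem.Str.upper t) "NOT"
-- query.split() filtered as both Pythons do
def pvReqTerms (query : String) : List String :=
  (PySem.Str.split₀ query).filter (fun t => !pvIsOp t && !pvStartsNot t)
def pvExcTerms (query : String) : List String :=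
  ((PySem.Str.split₀ query).filter (fun t => pvStartsNot t)).map
    (fun t => PySem.Str.slice t (some 4) none)
-- 'term in inverted_index' / 'inverted_index[term]' on the dict parameter (assoc list, first match)
def pvLookup (inverted_index : List (String × List String)) (t : String) : Option (List String) :=
  (inverted_index.find? (fun p => p.1 == t)).map (fun p => p.2)
-- titles.index(doc); Python raises ValueError when doc ∉ titles — excluded by Pre_, default 0 there
def pvIdx (titles : List String) (d : String) : Int :=
  match PySem.List.index? titles d with
  | some k => (k : Int)
  | none => 0
-- {titles.index(doc) for doc in docs}
def pvIdxSet (titles : List String) (docs : List String) : PySem.Set Int :=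
  PySem.Set.ofList (docs.map (pvIdx titles))
-- the excluded-indices loop, identical in both Pythons
def pvExcLoop (inverted_index : List (String × List String)) (titles : List String) :
    List String → PySem.Set Int → PySem.Set Int
  | [], acc => acc
  | t :: ts, acc =>
      pvExcLoop inverted_index titles ts
        (match pvLookup inverted_index t with
         | some docs => PySem.Set.union acc (pvIdxSet titles docs)
         | none => acc)

-- ===== PORT A =====
-- the required-terms loop: intersect, break to set() on a missing term
def pvAndLoop (inverted_index : List (String × List String)) (titles : List String) :
    List String → PySem.Set Int → PySem.Set Int
  | [], cand => cand
  | t :: ts, cand =>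
      match pvLookup inverted_index t with
      | some docs => pvAndLoop inverted_index titles ts (PySem.Set.inter cand (pvIdxSet titles docs))
      | none => PySem.Set.empty

def filter_documents (query : String) (inverted_index : List (String × List String)) (titles : List String) : List Int :=
  let candidate := pvAndLoop inverted_index titles (pvReqTerms query)
      (PySem.Set.ofList (PySem.List.pyRange 0 (titles.length : Int) 1))
  let excluded := pvExcLoop inverted_index titles (pvExcTerms query) PySem.Set.empty
  PySem.Set.diff candidate excluded

-- ===== PORT B =====
-- distinct required terms in first-occurrence order; none = early 'return set()' on a missing term
def pvDistinct (inverted_index : List (String × List String)) :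
    List String → List String → Option (List String)
  | [], acc => some acc
  | t :: ts, acc =>
      match pvLookup inverted_index t with
      | none => none
      | some _ => pvDistinct inverted_index ts (PySem.Set.add acc t)

-- counts[i] = counts.get(i, 0) + 1 over each distinct term's index set
def pvCounts (inverted_index : List (String × List String)) (titles : List String)
    (dist : List String) : PySem.Dict Int Int :=
  dist.foldl
    (fun d t =>
      (pvIdxSet titles ((pvLookup inverted_index t).getD [])).foldl
        (fun d i => d.modify i 0 (· + 1)) d)
    PySem.Dict.empty

def filter_documents_alt (query : String) (inverted_index : List (String × List String)) (titles : List String) : List Int :=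
  match pvDistinct inverted_index (pvReqTerms query) [] with
  | none => PySem.Set.empty
  | some dist =>
      let counts := pvCounts inverted_index titles dist
      let excluded := pvExcLoop inverted_index titles (pvExcTerms query) PySem.Set.empty
      let need : Int := (dist.length : Int)
      PySem.Set.ofList
        ((PySem.List.pyRange 0 (titles.length : Int) 1).filter
          (fun i => counts.getD i 0 == need && !(PySem.Set.contains excluded i)))

-- ===== PRECONDITION & SPEC =====
-- Pre_ excludes exactly the inputs where Python A raises ValueError from titles.index:
-- a required term that is reached before the first missing required term, or an excluded
-- term present in the index, whose postings contain a document absent from titles.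
def Pre_filter_documents (query : String) (inverted_index : List (String × List String)) (titles : List String) : Prop :=
  (∀ k ∈ List.range (pvReqTerms query).length,
      (∀ i ∈ List.range (k + 1), (pvLookup inverted_index ((pvReqTerms query).getD i "")).isSome = true) →
      ∀ d ∈ (pvLookup inverted_index ((pvReqTerms query).getD k "")).getD [], d ∈ titles) ∧
  (∀ t ∈ pvExcTerms query, ∀ d ∈ (pvLookup inverted_index t).getD [], d ∈ titles)
instance (query : String) (inverted_index : List (String × List String)) (titles : List String) : Decidable (Pre_filter_documents query inverted_index titles) := by unfold Pre_filter_documents; infer_instance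

def pvWitness_filter_documents : String × (List (String × List String)) × List String :=
  ("alpha NOT beta", [("alpha", ["t1", "t2"])], ["t1", "t2"])

def Spec_filter_documents (query : String) (inverted_index : List (String × List String)) (titles : List String) (out : List Int) : Prop := out = filter_documents_alt query inverted_index titles
instance (query : String) (inverted_index : List (String × List String)) (titles : List String) (out : List Int) : Decidable (Spec_filter_documents query inverted_index titles out) := by unfold Spec_filter_documents; infer_instance

-- ===== CLAIM (what is proved, stated in full; the proofs are below) =====
def Claim_equal_filter_documents : Prop := ∀ (query : String) (inverted_index : List (String × List String)) (titles : List String), Dom_filter_documents query inverted_index titles → Pre_filter_documents query inverted_index titles → Spec_filter_documents query inverted_index titles (filter_documents query inverted_index titles)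

-- ===== LEMMAS AND PROOFS =====

theorem pvAndLoop_of_missing (inv : List (String × List String)) (titles : List String)
    (ts : List String) (S : PySem.Set Int)
    (h : ∃ t ∈ ts, pvLookup inv t = none) :
    pvAndLoop inv titles ts S = PySem.Set.empty := by
  induction ts generalizing S with
  | nil => simp at h
  | cons t ts ih =>
    obtain ⟨u, hu, hnone⟩ := h
    rcases List.mem_cons.mp hu with rfl | hu
    · simp [pvAndLoop, hnone]
    · cases hl : pvLookup inv t with
      | none => simp [pvAndLoop, hl]
      | some docs => simpa [pvAndLoop, hl] using ih _ ⟨u, hu, hnone⟩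

theorem pvDistinct_eq_none_iff (inv : List (String × List String))
    (ts acc : List String) :
    pvDistinct inv ts acc = none ↔ ∃ t ∈ ts, pvLookup inv t = none := by
  induction ts generalizing acc with
  | nil => simp [pvDistinct]
  | cons t ts ih =>
    cases hl : pvLookup inv t with
    | none => simp [pvDistinct, hl]
    | some docs =>
      simp only [pvDistinct, hl, ih]
      constructor
      · rintro ⟨u, hu, h⟩; exact ⟨u, List.mem_cons_of_mem _ hu, h⟩
      · rintro ⟨u, hu, h⟩
        rcases List.mem_cons.mp hu with rfl | hu
        · simp [hl] at h
        · exact ⟨u, hu, h⟩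

theorem pvDistinct_of_present (inv : List (String × List String))
    (ts : List String) (acc : List String)
    (h : ∀ t ∈ ts, (pvLookup inv t).isSome = true) :
    pvDistinct inv ts acc = some (PySem.Set.update acc ts) := by
  induction ts generalizing acc with
  | nil => simp [pvDistinct, PySem.Set.update]
  | cons t ts ih =>
    have ht := h t (List.mem_cons_self ..)
    cases hl : pvLookup inv t with
    | none => simp [hl] at ht
    | some docs =>
      rw [PySem.Set.update_cons]
      simpa [pvDistinct, hl] using ih _ (fun u hu => h u (List.mem_cons_of_mem _ hu))

theorem pvAndLoop_of_present (inv : List (String × List String)) (titles : List String)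
    (ts : List String) (S : PySem.Set Int)
    (h : ∀ t ∈ ts, (pvLookup inv t).isSome = true) :
    pvAndLoop inv titles ts S =
      S.filter (fun i => ts.all
        (fun t => PySem.Set.contains (pvIdxSet titles ((pvLookup inv t).getD [])) i)) := by
  induction ts generalizing S with
  | nil => simp [pvAndLoop]
  | cons t ts ih =>
    have ht := h t (List.mem_cons_self ..)
    cases hl : pvLookup inv t with
    | none => simp [hl] at ht
    | some docs =>
      have step : pvAndLoop inv titles (t :: ts) S =
          pvAndLoop inv titles ts (S.inter (pvIdxSet titles docs)) := by
        rw [pvAndLoop, hl]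
      rw [step, ih _ (fun u hu => h u (List.mem_cons_of_mem _ hu))]
      show (S.filter _).filter _ = _
      rw [List.filter_filter]
      apply List.filter_congr
      intro i _
      simp [hl, Bool.and_comm]

theorem pvCounts_aux (inv : List (String × List String)) (titles : List String)
    (dist : List String) (d : PySem.Dict Int Int) (i : Int) :
    (dist.foldl
      (fun d t =>
        (pvIdxSet titles ((pvLookup inv t).getD [])).foldl
          (fun d i => d.modify i 0 (· + 1)) d) d).getD i 0 =
      d.getD i 0 + ((dist.countP
        (fun t => PySem.Set.contains (pvIdxSet titles ((pvLookup inv t).getD [])) i) : Nat) : Int) := by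
  induction dist generalizing d with
  | nil => simp
  | cons t ts ih =>
    rw [List.foldl_cons, ih, List.countP_cons]
    rw [PySem.Dict.getD_foldl_modify_add_one]
    have hnd : (pvIdxSet titles ((pvLookup inv t).getD [])).Nodup := PySem.Set.nodup_ofList _
    by_cases hmem : i ∈ pvIdxSet titles ((pvLookup inv t).getD [])
    · rw [List.count_eq_one_of_mem hnd hmem]
      simp [hmem]
      ring
    · rw [List.count_eq_zero_of_not_mem hmem]
      simp [hmem]

theorem pvCounts_getD (inv : List (String × List String)) (titles : List String)
    (dist : List String) (i : Int) :
    (pvCounts inv titles dist).getD i 0 =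
      ((dist.countP
        (fun t => PySem.Set.contains (pvIdxSet titles ((pvLookup inv t).getD [])) i) : Nat) : Int) := by
  simpa using pvCounts_aux inv titles dist PySem.Dict.empty i

theorem pyRange_nodup (n : Nat) : (PySem.List.pyRange 0 (n : Int) 1).Nodup := by
  rw [PySem.List.pyRange_zero_natCast]
  exact List.Nodup.map Nat.cast_injective List.nodup_range

theorem ports_eq (query : String) (inverted_index : List (String × List String))
    (titles : List String) :
    filter_documents query inverted_index titles =
      filter_documents_alt query inverted_index titles := by
  unfold filter_documents filter_documents_alt
  by_cases hm : ∃ t ∈ pvReqTerms query, pvLookup inverted_index t = none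
  · rw [(pvDistinct_eq_none_iff _ _ _).mpr hm,
      pvAndLoop_of_missing _ _ _ _ hm]
    rfl
  · have hp : ∀ t ∈ pvReqTerms query, (pvLookup inverted_index t).isSome = true := by
      intro t ht
      cases hl : pvLookup inverted_index t with
      | none => exact absurd ⟨t, ht, hl⟩ hm
      | some _ => rfl
    simp only [pvDistinct_of_present _ _ _ hp, pvAndLoop_of_present _ _ _ _ hp,
      PySem.Set.update_nil_left]
    set D := PySem.Set.ofList (pvReqTerms query) with hD
    set bad := pvExcLoop inverted_index titles (pvExcTerms query) PySem.Set.empty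
    have hrange := pyRange_nodup titles.length
    rw [PySem.Set.ofList_eq_self_of_nodup _ hrange]
    show PySem.Set.diff _ _ = _
    rw [PySem.Set.ofList_eq_self_of_nodup _ (hrange.filter _)]
    show (List.filter _ _).filter _ = _
    rw [List.filter_filter]
    apply List.filter_congr
    intro i _
    rw [pvCounts_getD inverted_index titles D i]
    conv_rhs => rw [Bool.and_comm]
    congr 1
    by_cases hall : ∀ t ∈ pvReqTerms query,
        (pvIdxSet titles ((pvLookup inverted_index t).getD [])).contains i = true
    · have hcl : (D.countP fun t =>
          (pvIdxSet titles ((pvLookup inverted_index t).getD [])).contains i) = D.length := by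
        rw [List.countP_eq_length]
        intro t ht; exact hall t ((PySem.Set.mem_ofList _ _).mp ht)
      rw [List.all_eq_true.mpr hall]
      exact (beq_iff_eq.mpr (congrArg Nat.cast hcl)).symm
    · have hcl : (D.countP fun t =>
          (pvIdxSet titles ((pvLookup inverted_index t).getD [])).contains i) ≠ D.length := by
        intro hcl2; rw [List.countP_eq_length] at hcl2
        exact hall (fun t ht => hcl2 t ((PySem.Set.mem_ofList _ _).mpr ht))
      have hb : ((pvReqTerms query).all fun t =>
          (pvIdxSet titles ((pvLookup inverted_index t).getD [])).contains i) = false := by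
        simpa [List.all_eq_true] using hall
      rw [hb, beq_eq_false_iff_ne.mpr (fun h => hcl (Nat.cast_injective h))]

-- ===== VERDICT (by name: the statement is the Claim_ definition above) =====
theorem filter_documents_spec : Claim_equal_filter_documents := by
  intro query inverted_index titles _ _
  exact ports_eq query inverted_index titles
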